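-- pv_equiv track=rewrite | github.com/Michael23Magdy/hide-seek-webgame-lp-solver | backend/payoff_fn.py | adjusted_win_matrix
-- ===== SOURCE A (Python) =====
-- def chebyshev_distance(i1, j1, i2, j2):
--     return max(abs(i1 - i2), abs(j1 - j2))
--
-- def adjusted_win_matrix(rows, cols, base_win, i, j, player_sign):
--     win_row = [0 for _ in range(rows * cols)]
--     for m in range(rows):
--         for n in range(cols):
--             seeker_idx = m * cols + n
--             dist = chebyshev_distance(i, j, m, n)
--
--             if dist == 1:
--                 multiplier = 0.5
--             elif dist == 2:
--                 multiplier = 0.75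
--             else:
--                 multiplier = 1.0
--
--             win_row[seeker_idx] = int(player_sign * base_win * multiplier)
--     return win_row
-- ===== SOURCE B (Python) =====
-- def adjusted_win_matrix(rows, cols, base_win, i, j, player_sign):
--     # Default-fill the whole row, then patch only the <=5x5 neighbourhood of (i, j).
--     default = int(player_sign * base_win * 1.0)
--     half = int(player_sign * base_win * 0.5)
--     three_q = int(player_sign * base_win * 0.75)
--     win_row = [default] * (rows * cols)
--     for m in range(max(0, i - 2), min(rows, i + 3)):
--         for n in range(max(0, j - 2), min(cols, j + 3)):
--             dist = max(abs(i - m), abs(j - n))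
--             if dist == 1:
--                 win_row[m * cols + n] = half
--             elif dist == 2:
--                 win_row[m * cols + n] = three_q
--     return win_row
-- ===== Notes on version B (the rewrite author's own statement) =====
-- stated objective: alternative
-- what changed: Instead of scanning every grid cell and branching on its Chebyshev distance, B fills the whole row with the default payoff in one list-repeat and then patches only the at-most-5x5 clamped neighbourhood of (i,j) where the distance is 1 or 2.
-- outside the precondition, e.g. on adjusted_win_matrix(-2, -3, 10, 0, 0, 1): A returns [0, 0, 0, 0, 0, 0], B returns [10, 10, 10, 10, 10, 10]
import Mathlib
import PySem

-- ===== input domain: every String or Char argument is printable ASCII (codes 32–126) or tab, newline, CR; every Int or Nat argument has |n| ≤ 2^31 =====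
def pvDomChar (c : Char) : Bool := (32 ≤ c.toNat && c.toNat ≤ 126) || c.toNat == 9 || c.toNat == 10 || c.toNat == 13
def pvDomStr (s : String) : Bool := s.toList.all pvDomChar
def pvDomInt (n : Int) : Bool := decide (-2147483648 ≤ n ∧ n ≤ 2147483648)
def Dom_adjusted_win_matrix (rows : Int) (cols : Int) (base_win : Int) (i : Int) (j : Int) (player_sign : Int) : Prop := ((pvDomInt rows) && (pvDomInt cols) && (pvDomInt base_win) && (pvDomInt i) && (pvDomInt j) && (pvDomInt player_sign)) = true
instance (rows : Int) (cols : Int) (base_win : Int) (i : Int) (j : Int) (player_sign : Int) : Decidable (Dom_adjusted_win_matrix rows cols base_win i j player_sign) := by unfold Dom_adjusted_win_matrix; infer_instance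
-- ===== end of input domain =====

-- B replaces A's full-grid scan (distance branch at every cell) with a bulk default fill plus a
-- patch of the at-most-5x5 clamped neighbourhood of (i, j); objective: alternative.

-- ===== PORT A =====
-- Python's int→float conversion rounds to the nearest 53-bit double (ties to even); this models it
-- exactly on integers, so int(x*1.0) = pvRnd53 x, int(x*0.5) = tdiv (pvRnd53 x) 2 and
-- int(x*0.75) = tdiv (pvRnd53 (3 * pvRnd53 x)) 4 (the *0.5 and /4 scalings are exact in IEEE;
-- int() truncates toward zero = Int.tdiv). Both ports use these exact integer forms.
def pvRnd53 (y : Int) : Int :=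
  let a := y.natAbs
  if a ≤ 2 ^ 53 then y
  else
    let e := a.log2 - 52
    let q := a / 2 ^ e
    let r := a % 2 ^ e
    let h := 2 ^ (e - 1)
    let q' := if h < r ∨ (r = h ∧ q % 2 = 1) then q + 1 else q
    if y < 0 then -((q' * 2 ^ e : ℕ) : Int) else ((q' * 2 ^ e : ℕ) : Int)

-- chebyshev_distance(i1, j1, i2, j2)
def pvCheb (i1 : Int) (j1 : Int) (i2 : Int) (j2 : Int) : Int := max |i1 - i2| |j1 - j2|

def adjusted_win_matrix (rows : Int) (cols : Int) (base_win : Int) (i : Int) (j : Int) (player_sign : Int) : List Int :=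
  let win_row : List Int := List.replicate (rows * cols).toNat 0
  (PySem.List.pyRange 0 rows 1).foldl (fun w m =>
    (PySem.List.pyRange 0 cols 1).foldl (fun w n =>
      let dist := pvCheb i j m n
      let v : Int :=
        if dist = 1 then Int.tdiv (pvRnd53 (player_sign * base_win)) 2
        else if dist = 2 then Int.tdiv (pvRnd53 (3 * pvRnd53 (player_sign * base_win))) 4
        else pvRnd53 (player_sign * base_win)
      PySem.List.pySetD w (m * cols + n) v) w) win_row

-- ===== PORT B =====
def adjusted_win_matrix_alt (rows : Int) (cols : Int) (base_win : Int) (i : Int) (j : Int) (player_sign : Int) : List Int :=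
  let half : Int := Int.tdiv (pvRnd53 (player_sign * base_win)) 2
  let three_q : Int := Int.tdiv (pvRnd53 (3 * pvRnd53 (player_sign * base_win))) 4
  let win_row : List Int := List.replicate (rows * cols).toNat (pvRnd53 (player_sign * base_win))
  (PySem.List.pyRange (max 0 (i - 2)) (min rows (i + 3)) 1).foldl (fun w m =>
    (PySem.List.pyRange (max 0 (j - 2)) (min cols (j + 3)) 1).foldl (fun w n =>
      let dist := max |i - m| |j - n|
      if dist = 1 then PySem.List.pySetD w (m * cols + n) half
      else if dist = 2 then PySem.List.pySetD w (m * cols + n) three_q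
      else w) w) win_row

-- ===== PRECONDITION & SPEC =====
-- Pre_ excludes only the case where rows and cols are BOTH negative — outside the task's natural
-- domain of grid dimensions; there rows*cols > 0 yet the grid has no cells, A's loops never run
-- (zero row) while B's bulk fill populates rows*cols cells, and neither value is specified.
def Pre_adjusted_win_matrix (rows : Int) (cols : Int) (base_win : Int) (i : Int) (j : Int) (player_sign : Int) : Prop :=
  0 ≤ rows ∨ 0 ≤ cols
instance (rows : Int) (cols : Int) (base_win : Int) (i : Int) (j : Int) (player_sign : Int) : Decidable (Pre_adjusted_win_matrix rows cols base_win i j player_sign) := by unfold Pre_adjusted_win_matrix; infer_instance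

def pvWitness_adjusted_win_matrix : Int × Int × Int × Int × Int × Int := (3, 3, 10, 1, 1, 1)

def Spec_adjusted_win_matrix (rows : Int) (cols : Int) (base_win : Int) (i : Int) (j : Int) (player_sign : Int) (out : List Int) : Prop := out = adjusted_win_matrix_alt rows cols base_win i j player_sign
instance (rows : Int) (cols : Int) (base_win : Int) (i : Int) (j : Int) (player_sign : Int) (out : List Int) : Decidable (Spec_adjusted_win_matrix rows cols base_win i j player_sign out) := by unfold Spec_adjusted_win_matrix; infer_instance

-- ===== CLAIM (what is proved, stated in full; the proofs are below) =====
def Claim_equal_adjusted_win_matrix : Prop := ∀ (rows : Int) (cols : Int) (base_win : Int) (i : Int) (j : Int) (player_sign : Int), Dom_adjusted_win_matrix rows cols base_win i j player_sign → Pre_adjusted_win_matrix rows cols base_win i j player_sign → Spec_adjusted_win_matrix rows cols base_win i j player_sign (adjusted_win_matrix rows cols base_win i j player_sign)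

-- ===== LEMMAS AND PROOFS =====

-- folds whose step preserves length preserve length
theorem pvFoldLen (L : List Int) (f : List Int → Int → List Int)
    (h : ∀ w n, (f w n).length = w.length) :
    ∀ w, (L.foldl f w).length = w.length := by
  induction L with
  | nil => intro w; rfl
  | cons a t ih => intro w; rw [List.foldl_cons, ih, h]

-- a fold none of whose steps touches index k leaves index k alone
theorem pvFoldNotouch (L : List Int) (f : List Int → Int → List Int) (k : ℕ)
    (h : ∀ w n, n ∈ L → (f w n)[k]? = w[k]?) :
    ∀ w, (L.foldl f w)[k]? = w[k]? := by
  induction L with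
  | nil => intro w; rfl
  | cons a t ih =>
    intro w
    rw [List.foldl_cons, ih (fun w n hn => h w n (List.mem_cons_of_mem a hn))]
    exact h w a List.mem_cons_self

-- a fold over a range that touches index k at step n0 and never afterwards writes v there
theorem pvFoldTouch (f : List Int → Int → List Int) (a b n0 : Int) (k L0 : ℕ) (v : Int)
    (h1 : a ≤ n0) (h2 : n0 < b)
    (hlen : ∀ w n, (f w n).length = w.length)
    (hset : ∀ w : List Int, w.length = L0 → (f w n0)[k]? = some v)
    (hafter : ∀ (w : List Int) (n : Int), n0 < n → n < b → (f w n)[k]? = w[k]?) :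
    ∀ w : List Int, w.length = L0 → ((PySem.List.pyRange a b 1).foldl f w)[k]? = some v := by
  intro w hw
  rw [PySem.List.pyRange_one_append a n0 b h1 (le_of_lt h2),
      PySem.List.pyRange_one_cons h2, List.foldl_append, List.foldl_cons]
  rw [pvFoldNotouch _ f k (fun w n hn => by
    rcases PySem.List.mem_pyRange_one.1 hn with ⟨hlo, hhi⟩
    exact hafter w n (by omega) hhi)]
  exact hset _ (by rw [pvFoldLen _ f hlen, hw])

-- the flat index (m, n) ↦ m*cols+n is injective for valid column offsets
theorem pvIdxInj (cols m m' n n' : Int) (hn : 0 ≤ n) (hn2 : n < cols)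
    (hm : 0 ≤ n') (hm2 : n' < cols) (h : m * cols + n = m' * cols + n') : m = m' ∧ n = n' := by
  have hc : 0 < cols := by omega
  rcases lt_trichotomy m m' with hlt | heq | hgt
  · exfalso
    have h2 : (m + 1) * cols ≤ m' * cols :=
      mul_le_mul_of_nonneg_right (by omega) (le_of_lt hc)
    nlinarith
  · exact ⟨heq, by subst heq; omega⟩
  · exfalso
    have h2 : (m' + 1) * cols ≤ m * cols :=
      mul_le_mul_of_nonneg_right (by omega) (le_of_lt hc)
    nlinarith

theorem pvSetD_get_ne (w : List Int) (idx : Int) (v : Int) (k : ℕ)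
    (hnn : 0 ≤ idx) (hne : idx ≠ (k : Int)) :
    (PySem.List.pySetD w idx v)[k]? = w[k]? := by
  rw [PySem.List.pySetD_of_nonneg w v hnn]
  exact List.getElem?_set_ne (by omega)

theorem pvSetD_get_eq (w : List Int) (idx : Int) (v : Int) (k : ℕ)
    (hnn : 0 ≤ idx) (heq : idx = (k : Int)) (hk : k < w.length) :
    (PySem.List.pySetD w idx v)[k]? = some v := by
  rw [PySem.List.pySetD_of_nonneg w v hnn]
  have h : idx.toNat = k := by omega
  rw [h]
  exact List.getElem?_set_self hk

-- the per-cell value both programs agree on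
def pvVal (base_win i j player_sign m n : Int) : Int :=
  if pvCheb i j m n = 1 then Int.tdiv (pvRnd53 (player_sign * base_win)) 2
  else if pvCheb i j m n = 2 then Int.tdiv (pvRnd53 (3 * pvRnd53 (player_sign * base_win))) 4
  else pvRnd53 (player_sign * base_win)

theorem pvGridN (rows cols : Int) (hr : 0 ≤ rows) (hc : 0 ≤ cols) :
    (rows * cols).toNat = rows.toNat * cols.toNat := Int.toNat_mul hr hc

-- characterisation of A's result, entry by entry
theorem pvA_get (rows cols base_win i j player_sign : Int) (hr : 0 ≤ rows) (hc : 0 ≤ cols) (k : ℕ) :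
    (adjusted_win_matrix rows cols base_win i j player_sign)[k]? =
      if k < (rows * cols).toNat then
        some (pvVal base_win i j player_sign ((k / cols.toNat : ℕ) : Int) ((k % cols.toNat : ℕ) : Int))
      else none := by
  unfold adjusted_win_matrix
  dsimp only
  set N : ℕ := (rows * cols).toNat with hN
  have hlenStep : ∀ (m : Int) (w : List Int) (n : Int),
      (PySem.List.pySetD w (m * cols + n)
        (if pvCheb i j m n = 1 then Int.tdiv (pvRnd53 (player_sign * base_win)) 2
         else if pvCheb i j m n = 2 then Int.tdiv (pvRnd53 (3 * pvRnd53 (player_sign * base_win))) 4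
         else pvRnd53 (player_sign * base_win))).length = w.length := by
    intro m w n; exact PySem.List.length_pySetD _ _ _
  have hlenOuter : ∀ (w : List Int) (m : Int),
      ((PySem.List.pyRange 0 cols 1).foldl (fun w n =>
        PySem.List.pySetD w (m * cols + n)
          (if pvCheb i j m n = 1 then Int.tdiv (pvRnd53 (player_sign * base_win)) 2
           else if pvCheb i j m n = 2 then Int.tdiv (pvRnd53 (3 * pvRnd53 (player_sign * base_win))) 4
           else pvRnd53 (player_sign * base_win))) w).length = w.length := by
    intro w m; exact pvFoldLen _ _ (hlenStep m) w
  by_cases hk : k < N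
  · rw [if_pos hk]
    have hNm : N = rows.toNat * cols.toNat := pvGridN rows cols hr hc
    have hcn : 0 < cols.toNat := by
      rcases Nat.eq_zero_or_pos cols.toNat with h0 | h
      · exfalso; rw [h0, Nat.mul_zero] at hNm; omega
      · exact h
    set mk : ℕ := k / cols.toNat with hmk
    set nk : ℕ := k % cols.toNat with hnk
    have hmk2 : mk < rows.toNat := (Nat.div_lt_iff_lt_mul hcn).2 (by omega)
    have hnk2 : nk < cols.toNat := Nat.mod_lt _ hcn
    have hdm : mk * cols.toNat + nk = k := by
      rw [hmk, hnk, Nat.mul_comm]; exact Nat.div_add_mod k cols.toNat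
    have hcolsE : ((cols.toNat : ℕ) : Int) = cols := Int.toNat_of_nonneg hc
    have hidx : (mk : Int) * cols + (nk : Int) = (k : Int) := by
      have h2 : ((mk * cols.toNat + nk : ℕ) : Int) = (k : Int) := by exact_mod_cast hdm
      push_cast at h2
      rw [hcolsE] at h2
      exact h2
    apply pvFoldTouch _ 0 rows (mk : Int) k N _ (Int.natCast_nonneg mk) (by omega) hlenOuter
    · -- hset: the row mk writes the value at k
      intro w hw
      apply pvFoldTouch _ 0 cols (nk : Int) k N _ (Int.natCast_nonneg nk) (by omega) (hlenStep _)
      · intro w2 hw2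
        exact pvSetD_get_eq w2 _ _ k (by omega) hidx (by omega)
      · intro w2 n hn1 hn2
        apply pvSetD_get_ne w2 _ _ k
        · have : 0 ≤ (mk : Int) * cols := mul_nonneg (Int.natCast_nonneg mk) hc
          omega
        · intro hcon; omega
      · exact hw
    · -- hafter: later rows never touch k
      intro w m hm1 hm2
      apply pvFoldNotouch _ _ k
      intro w2 n hn
      rcases PySem.List.mem_pyRange_one.1 hn with ⟨hn0, hn1⟩
      apply pvSetD_get_ne w2 _ _ k
      · have h0m : 0 ≤ m := le_trans (Int.natCast_nonneg mk) (le_of_lt hm1)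
        have : 0 ≤ m * cols := mul_nonneg h0m hc
        omega
      · intro hcon
        have heq2 : m * cols + n = (mk : Int) * cols + (nk : Int) := by rw [hidx]; exact hcon
        have hnkc : (nk : Int) < cols := by rw [← hcolsE]; exact_mod_cast hnk2
        have h3 := pvIdxInj cols m (mk : Int) n (nk : Int) hn0 hn1 (Int.natCast_nonneg nk)
          hnkc heq2
        exact absurd h3.1.symm (ne_of_lt hm1)
    · exact List.length_replicate
  · rw [if_neg hk]
    apply List.getElem?_eq_none
    rw [pvFoldLen _ _ hlenOuter, List.length_replicate]
    omega

-- characterisation of B's result: the same entries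
theorem pvB_get (rows cols base_win i j player_sign : Int) (hr : 0 ≤ rows) (hc : 0 ≤ cols) (k : ℕ) :
    (adjusted_win_matrix_alt rows cols base_win i j player_sign)[k]? =
      if k < (rows * cols).toNat then
        some (pvVal base_win i j player_sign ((k / cols.toNat : ℕ) : Int) ((k % cols.toNat : ℕ) : Int))
      else none := by
  unfold adjusted_win_matrix_alt
  dsimp only
  set N : ℕ := (rows * cols).toNat with hN
  have hlenStep : ∀ (m : Int) (w : List Int) (n : Int),
      (if max |i - m| |j - n| = 1 then PySem.List.pySetD w (m * cols + n) (Int.tdiv (pvRnd53 (player_sign * base_win)) 2)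
       else if max |i - m| |j - n| = 2 then PySem.List.pySetD w (m * cols + n) (Int.tdiv (pvRnd53 (3 * pvRnd53 (player_sign * base_win))) 4)
       else w).length = w.length := by
    intro m w n
    split_ifs <;> first | exact PySem.List.length_pySetD _ _ _ | rfl
  have hlenOuter : ∀ (w : List Int) (m : Int),
      ((PySem.List.pyRange (max 0 (j - 2)) (min cols (j + 3)) 1).foldl (fun w n =>
        if max |i - m| |j - n| = 1 then PySem.List.pySetD w (m * cols + n) (Int.tdiv (pvRnd53 (player_sign * base_win)) 2)
        else if max |i - m| |j - n| = 2 then PySem.List.pySetD w (m * cols + n) (Int.tdiv (pvRnd53 (3 * pvRnd53 (player_sign * base_win))) 4)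
        else w) w).length = w.length := by
    intro w m; exact pvFoldLen _ _ (hlenStep m) w
  by_cases hk : k < N
  · rw [if_pos hk]
    have hNm : N = rows.toNat * cols.toNat := pvGridN rows cols hr hc
    have hcn : 0 < cols.toNat := by
      rcases Nat.eq_zero_or_pos cols.toNat with h0 | h
      · exfalso; rw [h0, Nat.mul_zero] at hNm; omega
      · exact h
    set mk : ℕ := k / cols.toNat with hmk
    set nk : ℕ := k % cols.toNat with hnk
    have hmk2 : mk < rows.toNat := (Nat.div_lt_iff_lt_mul hcn).2 (by omega)
    have hnk2 : nk < cols.toNat := Nat.mod_lt _ hcn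
    have hdm : mk * cols.toNat + nk = k := by
      rw [hmk, hnk, Nat.mul_comm]; exact Nat.div_add_mod k cols.toNat
    have hcolsE : ((cols.toNat : ℕ) : Int) = cols := Int.toNat_of_nonneg hc
    have hrowsE : ((rows.toNat : ℕ) : Int) = rows := Int.toNat_of_nonneg hr
    have hidx : (mk : Int) * cols + (nk : Int) = (k : Int) := by
      have h2 : ((mk * cols.toNat + nk : ℕ) : Int) = (k : Int) := by exact_mod_cast hdm
      push_cast at h2
      rw [hcolsE] at h2
      exact h2
    have hmkRows : (mk : Int) < rows := by
      rw [← hrowsE]; exact_mod_cast hmk2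
    have hnkCols : (nk : Int) < cols := by
      rw [← hcolsE]; exact_mod_cast hnk2
    by_cases hhit : pvCheb i j (mk : Int) (nk : Int) = 1 ∨ pvCheb i j (mk : Int) (nk : Int) = 2
    · -- (mk, nk) lies in the patched window and gets written
      have habs : |i - (mk : Int)| ≤ 2 ∧ |j - (nk : Int)| ≤ 2 := by
        unfold pvCheb at hhit
        rcases hhit with hh | hh
        · exact ⟨le_trans (le_trans (le_max_left _ _) (le_of_eq hh)) (by norm_num),
                 le_trans (le_trans (le_max_right _ _) (le_of_eq hh)) (by norm_num)⟩
        · exact ⟨le_trans (le_max_left _ _) (le_of_eq hh),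
                 le_trans (le_max_right _ _) (le_of_eq hh)⟩
      have hia := abs_le.mp habs.1
      have hja := abs_le.mp habs.2
      have hmw1 : max 0 (i - 2) ≤ (mk : Int) :=
        max_le_iff.mpr ⟨Int.natCast_nonneg mk, by omega⟩
      have hmw2 : (mk : Int) < min rows (i + 3) :=
        lt_min_iff.mpr ⟨hmkRows, by omega⟩
      have hnw1 : max 0 (j - 2) ≤ (nk : Int) :=
        max_le_iff.mpr ⟨Int.natCast_nonneg nk, by omega⟩
      have hnw2 : (nk : Int) < min cols (j + 3) :=
        lt_min_iff.mpr ⟨hnkCols, by omega⟩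
      apply pvFoldTouch _ _ _ (mk : Int) k N _ hmw1 hmw2 hlenOuter
      · -- the row mk writes pvVal at k
        intro w hw
        apply pvFoldTouch _ _ _ (nk : Int) k N _ hnw1 hnw2 (hlenStep _)
        · intro w2 hw2
          rcases hhit with hh | hh
          · have hvEq : pvVal base_win i j player_sign (mk : Int) (nk : Int) =
                Int.tdiv (pvRnd53 (player_sign * base_win)) 2 := by
              unfold pvVal; rw [if_pos hh]
            unfold pvCheb at hh
            rw [hvEq, if_pos hh]
            exact pvSetD_get_eq w2 _ _ k (by omega) hidx (by omega)
          · have hvEq : pvVal base_win i j player_sign (mk : Int) (nk : Int) =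
                Int.tdiv (pvRnd53 (3 * pvRnd53 (player_sign * base_win))) 4 := by
              unfold pvVal; rw [if_neg (by rw [hh]; decide), if_pos hh]
            unfold pvCheb at hh
            rw [hvEq, if_neg (by rw [hh]; decide), if_pos hh]
            exact pvSetD_get_eq w2 _ _ k (by omega) hidx (by omega)
        · intro w2 n hn1 hn2
          have h0n : 0 ≤ n := le_trans (Int.natCast_nonneg nk) (le_of_lt hn1)
          have hge : 0 ≤ (mk : Int) * cols := mul_nonneg (Int.natCast_nonneg mk) hc
          split_ifs <;> first
            | rfl
            | · apply pvSetD_get_ne w2 _ _ k (by omega)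
                intro hcon; omega
        · exact hw
      · -- later rows in the window never touch k
        intro w m hm1 hm2
        apply pvFoldNotouch _ _ k
        intro w2 n hn
        rcases PySem.List.mem_pyRange_one.1 hn with ⟨hn0, hn1⟩
        have h0n : 0 ≤ n := le_trans (le_max_left 0 (j - 2)) hn0
        have hncols : n < cols := lt_of_lt_of_le hn1 (min_le_left _ _)
        have h0m : 0 ≤ m := le_trans (Int.natCast_nonneg mk) (le_of_lt hm1)
        have hidxnn : 0 ≤ m * cols := mul_nonneg h0m hc
        split_ifs <;> first
          | rfl
          | · apply pvSetD_get_ne w2 _ _ k (by omega)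
              intro hcon
              have heq2 : m * cols + n = (mk : Int) * cols + (nk : Int) := by
                rw [hidx]; exact hcon
              have h3 := pvIdxInj cols m (mk : Int) n (nk : Int) h0n hncols
                (Int.natCast_nonneg nk) hnkCols heq2
              exact absurd h3.1.symm (ne_of_lt hm1)
      · exact List.length_replicate
    · -- no step touches k: the default survives, and it is pvVal there
      push Not at hhit
      rw [pvFoldNotouch _ _ k ?_]
      · rw [List.getElem?_replicate, if_pos hk]
        have hvEq : pvVal base_win i j player_sign (mk : Int) (nk : Int) = pvRnd53 (player_sign * base_win) := by
          unfold pvVal; rw [if_neg hhit.1, if_neg hhit.2]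
        rw [hvEq]
      · intro w m hm
        rcases PySem.List.mem_pyRange_one.1 hm with ⟨hm0, hm1⟩
        have h0m : 0 ≤ m := le_trans (le_max_left 0 (i - 2)) hm0
        have hmrows : m < rows := lt_of_lt_of_le hm1 (min_le_left _ _)
        apply pvFoldNotouch _ _ k
        intro w2 n hn
        rcases PySem.List.mem_pyRange_one.1 hn with ⟨hn0, hn1⟩
        have h0n : 0 ≤ n := le_trans (le_max_left 0 (j - 2)) hn0
        have hncols : n < cols := lt_of_lt_of_le hn1 (min_le_left _ _)
        have hidxnn : 0 ≤ m * cols := mul_nonneg h0m hc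
        by_cases hmn : m = (mk : Int) ∧ n = (nk : Int)
        · obtain ⟨e1, e2⟩ := hmn
          subst e1; subst e2
          have hx1 := hhit.1; have hx2 := hhit.2
          unfold pvCheb at hx1 hx2
          rw [if_neg hx1, if_neg hx2]
        · split_ifs <;> first
            | rfl
            | · apply pvSetD_get_ne w2 _ _ k (by omega)
                intro hcon
                have heq2 : m * cols + n = (mk : Int) * cols + (nk : Int) := by
                  rw [hidx]; exact hcon
                have h3 := pvIdxInj cols m (mk : Int) n (nk : Int) h0n hncols
                  (Int.natCast_nonneg nk) hnkCols heq2
                exact hmn ⟨h3.1, h3.2⟩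
  · rw [if_neg hk]
    apply List.getElem?_eq_none
    rw [pvFoldLen _ _ hlenOuter, List.length_replicate]
    omega

-- lengths of both results, used for the degenerate mixed-sign case
theorem pvA_len (rows cols base_win i j player_sign : Int) :
    (adjusted_win_matrix rows cols base_win i j player_sign).length = (rows * cols).toNat := by
  unfold adjusted_win_matrix
  dsimp only
  rw [pvFoldLen _ _ (fun w m => pvFoldLen _ _ (fun w2 n => PySem.List.length_pySetD _ _ _) w),
      List.length_replicate]

theorem pvB_len (rows cols base_win i j player_sign : Int) :
    (adjusted_win_matrix_alt rows cols base_win i j player_sign).length = (rows * cols).toNat := by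
  unfold adjusted_win_matrix_alt
  dsimp only
  rw [pvFoldLen _ _ (fun w m => pvFoldLen _ _ (fun w2 n => by
        split_ifs <;> first | exact PySem.List.length_pySetD _ _ _ | rfl) w),
      List.length_replicate]

-- ===== VERDICT =====
theorem adjusted_win_matrix_spec : Claim_equal_adjusted_win_matrix := by
  intro rows cols base_win i j player_sign _hdom hpre
  unfold Spec_adjusted_win_matrix
  by_cases hpos : 0 ≤ rows ∧ 0 ≤ cols
  · obtain ⟨hr, hc⟩ := hpos
    exact List.ext_getElem? (fun k => by
      rw [pvA_get rows cols base_win i j player_sign hr hc k,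
          pvB_get rows cols base_win i j player_sign hr hc k])
  · -- one dimension is negative (not both, by Pre_): rows*cols ≤ 0 and both results are []
    have hprod : rows * cols ≤ 0 := by
      rcases hpre with hr | hc
      · have hcneg : cols < 0 := by omega
        exact mul_nonpos_of_nonneg_of_nonpos hr (le_of_lt hcneg)
      · have hrneg : rows < 0 := by omega
        exact mul_nonpos_of_nonpos_of_nonneg (le_of_lt hrneg) hc
    have hN : (rows * cols).toNat = 0 := Int.toNat_of_nonpos hprod
    have hA := pvA_len rows cols base_win i j player_sign
    have hB := pvB_len rows cols base_win i j player_sign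
    rw [hN] at hA hB
    rw [List.length_eq_zero_iff.mp hA, List.length_eq_zero_iff.mp hB]
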